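-- pv_equiv track=rewrite | github.com/TinySnow/GitTraining | scripts/generate_titles.py | filter_items_by_prefix
-- ===== SOURCE A (Python) =====
-- def parse_path_expr(expr: str) -> list[str]:
--     """
--     将路径表达式解析为片段列表，支持分隔符：
--       /, \\, ->, →, __
--
--     说明：
--       - 允许用户在不同输入习惯下混用分隔符
--       - 连续分隔符/空片段会被自动忽略
--     """
--     expr = (expr or "").strip()
--     if not expr:
--         return []
--     normalized = expr.replace("->", "/").replace("→", "/").replace("__", "/").replace("\\", "/")
--     return [p.strip() for p in normalized.split("/") if p.strip()]
--
-- def filter_items_by_prefix(items: list[tuple], path_expr: str, sheet_hint: str = "") -> tuple[list[tuple], list[str]]: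
--     """
--     按路径前缀筛选 XMind 条目。
--     每个 item 结构为：
--       (sheet_name, topic, path_parts, folder_parts, is_non_leaf)
--     返回：(过滤后条目, 命中的前缀片段列表)。
--
--     匹配策略：
--       - 既支持“完整路径”（从根开始），也支持“局部路径”（自动补根）
--       - 候选前缀按命中条目数量择优，最大化用户输入命中概率
--     """
--     prefix_parts = parse_path_expr(path_expr)
--     if not prefix_parts:
--         return items, []
--
--     roots = []
--     for _, _, path_parts, _, _ in items:
--         if path_parts:
--             root = path_parts[0]
--             if root not in roots:
--                 roots.append(root)
--
--     # 候选前缀既支持完整路径（从根开始），也支持局部路径（自动补根后再匹配）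
--     candidates = [prefix_parts]
--     for root in roots:
--         if prefix_parts[0] != root:
--             candidates.append([root] + prefix_parts)
--     if sheet_hint and prefix_parts[0] != sheet_hint:
--         candidates.append([sheet_hint] + prefix_parts)
--
--     # 去重并保持顺序
--     uniq_candidates = []
--     seen = set()
--     for cand in candidates:
--         key = tuple(cand)
--         if key in seen:
--             continue
--         seen.add(key)
--         uniq_candidates.append(cand)
--
--     best_items = []
--     best_prefix = []
--     for cand in uniq_candidates:
--         # 前缀命中规则：节点完整路径以 cand 开头
--         matched = [it for it in items if len(it[2]) >= len(cand) and it[2][:len(cand)] == cand]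
--         if len(matched) > len(best_items):
--             best_items = matched
--             best_prefix = cand
--
--     return best_items, best_prefix
-- ===== SOURCE B (Python) =====
-- def parse_path_expr(expr):
--     expr = (expr or "").strip()
--     if not expr:
--         return []
--     normalized = expr.replace("->", "/").replace("→", "/").replace("__", "/").replace("\\", "/")
--     return [p.strip() for p in normalized.split("/") if p.strip()]
--
-- def filter_items_by_prefix(items, path_expr, sheet_hint=""):
--     prefix = parse_path_expr(path_expr)
--     if not prefix:
--         return items, []
--     k = len(prefix)
--     # One grouped pass over the items: collect the items matching the bare
--     # prefix, and group items matching [root] + prefix under their own root.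
--     bare = []
--     roots = []            # first path elements, in first-appearance order
--     by_root = {}          # root -> items whose path matches [root] + prefix
--     for it in items:
--         path = it[2]
--         if path[:k] == prefix:
--             bare.append(it)
--         if path:
--             r = path[0]
--             if r not in by_root:
--                 by_root[r] = []
--                 roots.append(r)
--             if path[1:k + 1] == prefix:
--                 by_root[r].append(it)
--     # Candidates in order: the bare prefix first, then each auto-rooted prefix.
--     # A sheet_hint candidate can never win: any item it matches has first path
--     # element sheet_hint, so the auto-rooted candidate [sheet_hint] + prefix
--     # already collected exactly those items; otherwise it matches nothing.
--     best_items, best_prefix = [], []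
--     if bare:
--         best_items, best_prefix = bare, prefix
--     for r in roots:
--         if r != prefix[0] and len(by_root[r]) > len(best_items):
--             best_items, best_prefix = by_root[r], [r] + prefix
--     return best_items, best_prefix
-- ===== Notes on version B (the rewrite author's own statement) =====
-- stated objective: faster
-- what changed: Instead of rescanning all items for every candidate prefix, B makes one grouped pass that collects bare-prefix matches and buckets rooted matches by each item's first path element, then picks the best candidate from the buckets; the sheet_hint candidate is dropped because it can never win (its matches are exactly the bucket of root sheet_hint, already considered, or empty).
import Mathlib
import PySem

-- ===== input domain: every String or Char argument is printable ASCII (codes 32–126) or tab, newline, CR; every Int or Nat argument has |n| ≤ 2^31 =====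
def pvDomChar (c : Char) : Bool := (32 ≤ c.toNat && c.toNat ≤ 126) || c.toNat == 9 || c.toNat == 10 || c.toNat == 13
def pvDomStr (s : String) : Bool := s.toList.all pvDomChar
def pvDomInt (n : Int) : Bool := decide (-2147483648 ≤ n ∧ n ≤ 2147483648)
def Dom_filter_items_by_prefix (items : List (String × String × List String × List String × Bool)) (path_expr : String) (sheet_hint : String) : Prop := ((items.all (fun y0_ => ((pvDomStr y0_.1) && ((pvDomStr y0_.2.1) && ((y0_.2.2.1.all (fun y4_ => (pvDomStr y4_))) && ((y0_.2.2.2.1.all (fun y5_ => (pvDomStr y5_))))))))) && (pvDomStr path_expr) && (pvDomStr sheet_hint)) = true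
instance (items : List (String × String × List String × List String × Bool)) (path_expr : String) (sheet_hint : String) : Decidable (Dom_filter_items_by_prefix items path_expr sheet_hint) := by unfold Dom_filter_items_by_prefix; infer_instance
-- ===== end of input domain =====

-- B replaces A's per-candidate rescans of all items by ONE grouped pass (bare matches
-- plus rooted matches bucketed by each item's first path element); return value only,
-- no argument is mutated by either version.

abbrev PVItem := String × String × List String × List String × Bool

-- ===== PORT A =====
-- shared helper: Python's parse_path_expr (used verbatim by both A and B)
def parse_path_expr (expr : String) : List String :=
  let e := PySem.Str.strip expr
  if e = "" then []
  else
    let normalized := PySem.Str.replace (PySem.Str.replace (PySem.Str.replace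
      (PySem.Str.replace e "->" "/") "→" "/") "__" "/") "\\" "/"
    (((PySem.Str.split? normalized "/").getD []).filter (fun p => PySem.Str.strip p ≠ "")).map PySem.Str.strip

-- A's roots loop
def pvRootsA (items : List PVItem) : List String :=
  items.foldl (fun roots it =>
    match it.2.2.1 with
    | [] => roots
    | root :: _ => if root ∈ roots then roots else roots ++ [root]) []

-- A's matched comprehension:  [it for it in items if len(it[2]) >= len(cand) and it[2][:len(cand)] == cand]
def pvMatched (items : List PVItem) (cand : List String) : List PVItem :=
  items.filter (fun it => decide (cand.length ≤ it.2.2.1.length) && decide (it.2.2.1.take cand.length = cand))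

-- A's best-candidate loop body
def pvConsider (items : List PVItem) (best : List PVItem × List String) (cand : List String) :
    List PVItem × List String :=
  let matched := pvMatched items cand
  if matched.length > best.1.length then (matched, cand) else best

-- A's dedupe loop (seen : Python set)
def pvDedup (cands : List (List String)) : List (List String) :=
  (cands.foldl (fun (st : List (List String) × PySem.Set (List String)) cand =>
    if cand ∈ st.2 then st else (st.1 ++ [cand], PySem.Set.add st.2 cand)) ([], PySem.Set.empty)).1

def filter_items_by_prefix (items : List (String × String × List String × List String × Bool)) (path_expr : String) (sheet_hint : String) : (List (String × String × List String × List String × Bool)) × List String :=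
  let prefix_parts := parse_path_expr path_expr
  match prefix_parts with
  | [] => (items, [])
  | p0 :: rest =>
    let pre := p0 :: rest
    let roots := pvRootsA items
    let candidates := roots.foldl (fun cs root => if p0 ≠ root then cs ++ [root :: pre] else cs) [pre]
    let candidates := if sheet_hint ≠ "" ∧ p0 ≠ sheet_hint then candidates ++ [sheet_hint :: pre] else candidates
    (pvDedup candidates).foldl (pvConsider items) ([], [])

-- ===== PORT B =====
-- B's single grouped pass: state (bare matches, roots in order, root → rooted matches)
def pvStepB (pre : List String) (st : List PVItem × List String × PySem.Dict String (List PVItem))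
    (it : PVItem) : List PVItem × List String × PySem.Dict String (List PVItem) :=
  let k := pre.length
  let bare := if it.2.2.1.take k = pre then st.1 ++ [it] else st.1
  match it.2.2.1 with
  | [] => (bare, st.2.1, st.2.2)
  | r :: tail =>
    let rb : List String × PySem.Dict String (List PVItem) :=
      if st.2.2.contains r then (st.2.1, st.2.2) else (st.2.1 ++ [r], st.2.2.insert r [])
    let byroot := if tail.take k = pre then rb.2.modify r [] (fun l => l ++ [it]) else rb.2
    (bare, rb.1, byroot)

def filter_items_by_prefix_alt (items : List (String × String × List String × List String × Bool)) (path_expr : String) (sheet_hint : String) : (List (String × String × List String × List String × Bool)) × List String :=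
  let pre := parse_path_expr path_expr
  match pre with
  | [] => (items, [])
  | p0 :: rest =>
    let pre := p0 :: rest
    let st := items.foldl (pvStepB pre) ([], [], PySem.Dict.empty)
    let best : List PVItem × List String := if st.1.isEmpty then ([], []) else (st.1, pre)
    st.2.1.foldl (fun b r =>
      if r ≠ p0 ∧ (st.2.2.getD r []).length > b.1.length then (st.2.2.getD r [], r :: pre) else b) best

-- ===== PRECONDITION & SPEC =====
def Spec_filter_items_by_prefix (items : List (String × String × List String × List String × Bool)) (path_expr : String) (sheet_hint : String) (out : (List (String × String × List String × List String × Bool)) × List String) : Prop := out = filter_items_by_prefix_alt items path_expr sheet_hint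
instance (items : List (String × String × List String × List String × Bool)) (path_expr : String) (sheet_hint : String) (out : (List (String × String × List String × List String × Bool)) × List String) : Decidable (Spec_filter_items_by_prefix items path_expr sheet_hint out) := by
  unfold Spec_filter_items_by_prefix
  exact @instDecidableEqProd _ _ (@instDecidableEqList _ inferInstance) inferInstance _ _

-- ===== CLAIM (what is proved, stated in full; the proofs are below) =====
def Claim_equal_filter_items_by_prefix : Prop := ∀ (items : List (String × String × List String × List String × Bool)) (path_expr : String) (sheet_hint : String), Dom_filter_items_by_prefix items path_expr sheet_hint → Spec_filter_items_by_prefix items path_expr sheet_hint (filter_items_by_prefix items path_expr sheet_hint)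

-- ===== LEMMAS AND PROOFS =====

-- path of an item
def pvPath (it : PVItem) : List String := it.2.2.1

-- bare-prefix test and rooted test, as B's loop applies them
def pvBP (pre : List String) (it : PVItem) : Bool := decide ((pvPath it).take pre.length = pre)
def pvRP (pre : List String) (r : String) (it : PVItem) : Bool :=
  match pvPath it with
  | [] => false
  | x :: t => decide (x = r) && decide (t.take pre.length = pre)

-- A's roots step as a named function
def pvRStep (roots : List String) (it : PVItem) : List String :=
  match it.2.2.1 with
  | [] => roots
  | root :: _ => if root ∈ roots then roots else roots ++ [root]

theorem pvRootsA_eq (items : List PVItem) : pvRootsA items = items.foldl pvRStep [] := rfl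

-- a list that equals a take of itself is short enough
theorem pv_take_len {pre path : List String} (h : path.take pre.length = pre) :
    pre.length ≤ path.length := by
  have := congrArg List.length h
  simp [List.length_take] at this
  omega

theorem pvMatched_pre (items pre) : pvMatched items pre = items.filter (pvBP pre) := by
  unfold pvMatched
  apply List.filter_congr
  intro it _
  by_cases h : (pvPath it).take pre.length = pre
  · simp [pvBP, pvPath] at h ⊢
    simp [h, pv_take_len h]
  · simp [pvBP, pvPath] at h ⊢
    simp [h]

theorem pvMatched_cons (items pre r) :
    pvMatched items (r :: pre) = items.filter (pvRP pre r) := by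
  unfold pvMatched
  apply List.filter_congr
  intro it _
  cases hp : it.2.2.1 with
  | nil => simp [pvRP, pvPath, hp]
  | cons x t =>
    simp only [pvRP, pvPath, hp, List.length_cons, List.take_succ_cons]
    by_cases hx : x = r
    · subst hx
      by_cases h : t.take pre.length = pre
      · have := pv_take_len h
        simp [h, this]
        try omega
      · simp [h]
    · simp [hx]

theorem pvRootsA_inv (l : List PVItem) : ∀ (acc : List String), acc.Nodup →
    (l.foldl pvRStep acc).Nodup ∧
    (∀ r, r ∈ l.foldl pvRStep acc ↔ r ∈ acc ∨ ∃ it ∈ l, (pvPath it).head? = some r) := by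
  induction l with
  | nil => intro acc h; simp [h]
  | cons x xs ih =>
    intro acc hacc
    have hstep : (pvRStep acc x).Nodup ∧
        (∀ r, r ∈ pvRStep acc x ↔ r ∈ acc ∨ (pvPath x).head? = some r) := by
      cases hp : x.2.2.1 with
      | nil => simp [pvRStep, pvPath, hp, hacc]
      | cons x0 t =>
        by_cases hm : x0 ∈ acc
        · have hR : pvRStep acc x = acc := by simp [pvRStep, hp, hm]
          rw [hR]
          refine ⟨hacc, fun r => ?_⟩
          simp only [pvPath, hp, List.head?_cons, Option.some.injEq]
          constructor
          · exact fun h => Or.inl h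
          · rintro (h | h)
            · exact h
            · subst h; exact hm
        · have hR : pvRStep acc x = acc ++ [x0] := by simp [pvRStep, hp, hm]
          rw [hR]
          constructor
          · simp [List.nodup_append, hacc]
            exact fun a ha h => hm (h ▸ ha)
          · intro r
            simp only [pvPath, hp, List.head?_cons, Option.some.injEq, List.mem_append,
              List.mem_singleton]
            constructor
            · rintro (h | h)
              · exact Or.inl h
              · subst h; exact Or.inr rfl
            · rintro (h | h)
              · exact Or.inl h
              · subst h; exact Or.inr rfl
    obtain ⟨h1, h2⟩ := ih (pvRStep acc x) hstep.1
    refine ⟨h1, fun r => ?_⟩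
    rw [List.foldl_cons]
    rw [h2 r]
    simp only [hstep.2 r, List.mem_cons]
    constructor
    · rintro ((h | h) | ⟨it, hit, h⟩)
      · exact Or.inl h
      · exact Or.inr ⟨x, Or.inl rfl, h⟩
      · exact Or.inr ⟨it, Or.inr hit, h⟩
    · rintro (h | ⟨it, (rfl | hit), h⟩)
      · exact Or.inl (Or.inl h)
      · exact Or.inl (Or.inr h)
      · exact Or.inr ⟨it, hit, h⟩

theorem pvB_inv (pre : List String) (l : List PVItem) :
    ∀ (st : List PVItem × List String × PySem.Dict String (List PVItem)),
    (∀ r, st.2.2.contains r = decide (r ∈ st.2.1)) →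
    (l.foldl (pvStepB pre) st).1 = st.1 ++ l.filter (pvBP pre) ∧
    (l.foldl (pvStepB pre) st).2.1 = l.foldl pvRStep st.2.1 ∧
    (∀ r, (l.foldl (pvStepB pre) st).2.2.contains r
        = decide (r ∈ (l.foldl (pvStepB pre) st).2.1)) ∧
    (∀ r, (l.foldl (pvStepB pre) st).2.2.getD r []
        = st.2.2.getD r [] ++ l.filter (pvRP pre r)) := by
  induction l with
  | nil => intro st hc; simp [hc]
  | cons x xs ih =>
    intro st hc
    have hstep :
        (pvStepB pre st x).1 = st.1 ++ (if pvBP pre x then [x] else []) ∧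
        (pvStepB pre st x).2.1 = pvRStep st.2.1 x ∧
        (∀ r, (pvStepB pre st x).2.2.contains r = decide (r ∈ (pvStepB pre st x).2.1)) ∧
        (∀ r, (pvStepB pre st x).2.2.getD r []
            = st.2.2.getD r [] ++ (if pvRP pre r x then [x] else [])) := by
      cases hp : x.2.2.1 with
      | nil =>
        have hstepeq : pvStepB pre st x
            = ((if List.take pre.length ([] : List String) = pre then st.1 ++ [x] else st.1),
               st.2.1, st.2.2) := by
          simp only [pvStepB, hp]
        refine ⟨?_, ?_, ?_, ?_⟩
        · simp only [hstepeq, pvBP, pvPath, hp]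
          by_cases hb : pre = []
          · subst hb; simp
          · have hb' : ¬ (([] : List String) = pre) := fun h => hb h.symm
            simp [hb']
        · simp only [hstepeq, pvRStep, hp]
        · intro r; simp only [hstepeq]; exact hc r
        · intro r; simp only [hstepeq, pvRP, pvPath, hp]; simp
      | cons x0 t =>
        have hstepeq : pvStepB pre st x
            = ((if List.take pre.length (x0 :: t) = pre then st.1 ++ [x] else st.1),
               (if x0 ∈ st.2.1 then st.2.1 else st.2.1 ++ [x0]),
               (if List.take pre.length t = pre
                then (if x0 ∈ st.2.1 then st.2.2 else st.2.2.insert x0 []).modify x0 []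
                  (fun l => l ++ [x])
                else (if x0 ∈ st.2.1 then st.2.2 else st.2.2.insert x0 []))) := by
          simp only [pvStepB, hp, hc x0]
          by_cases hcont : x0 ∈ st.2.1 <;> simp [hcont]
        have hd1 : ∀ r, (if x0 ∈ st.2.1 then st.2.2 else st.2.2.insert x0 []).getD r []
            = st.2.2.getD r [] := by
          intro r
          by_cases hcont : x0 ∈ st.2.1
          · simp [hcont]
          · simp only [hcont, if_false]
            rw [PySem.Dict.getD_insert]
            have hx0 : st.2.2.getD x0 [] = [] :=
              PySem.Dict.getD_of_not_contains _ _ (by rw [hc x0]; simp [hcont])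
            by_cases hr : r = x0
            · subst hr; simp [hx0]
            · simp [hr]
        refine ⟨?_, ?_, ?_, ?_⟩
        · simp only [hstepeq, pvBP, pvPath, hp]
          by_cases hb : List.take pre.length (x0 :: t) = pre <;> simp [hb]
        · simp only [hstepeq, pvRStep, hp]
        · intro r
          simp only [hstepeq]
          by_cases hcont : x0 ∈ st.2.1
          · by_cases htk : List.take pre.length t = pre
            · simp only [hcont, if_true, htk]
              rw [PySem.Dict.contains_modify, hc r]
              by_cases hr : r = x0
              · subst hr; simp [hcont]
              · simp [hr]
            · simp [hcont, htk, hc r]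
          · by_cases htk : List.take pre.length t = pre
            · simp only [hcont, if_false, htk, if_true]
              rw [PySem.Dict.contains_modify, PySem.Dict.contains_insert, hc r]
              by_cases hr : r = x0 <;> simp [hr, hcont]
            · simp only [hcont, if_false, htk]
              rw [PySem.Dict.contains_insert, hc r]
              by_cases hr : r = x0 <;> simp [hr, hcont]
        · intro r
          simp only [hstepeq, pvRP, pvPath, hp]
          by_cases htk : List.take pre.length t = pre
          · simp only [htk, if_true]
            rw [PySem.Dict.getD_modify]
            by_cases hr : r = x0
            · subst hr; simp [hd1 r]
            · have hxr : ¬ (x0 = r) := fun h => hr h.symm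
              simp [hr, hxr, hd1 r]
          · simp only [htk, if_false]
            rw [hd1 r]
            simp
    obtain ⟨s1, s2, s3, s4⟩ := hstep
    obtain ⟨i1, i2, i3, i4⟩ := ih (pvStepB pre st x) s3
    rw [List.foldl_cons]
    refine ⟨?_, ?_, i3, ?_⟩
    · rw [i1, s1, List.filter_cons]
      by_cases hb : pvBP pre x <;> simp [hb]
    · rw [i2, s2, List.foldl_cons]
    · intro r
      rw [i4 r, s4 r, List.filter_cons]
      by_cases hb : pvRP pre r x <;> simp [hb]

-- A's candidates loop is filter-then-map
theorem pvCands (p0 : String) (pre : List String) (roots : List String) :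
    roots.foldl (fun cs root => if p0 ≠ root then cs ++ [root :: pre] else cs) [pre]
      = [pre] ++ (roots.filter (fun r => decide (p0 ≠ r))).map (· :: pre) := by
  have := PySem.List.foldl_append_if (fun r => decide (p0 ≠ r)) (fun r => r :: pre) roots [pre]
  simpa using this

-- dedupe of a duplicate-free list is the identity
theorem pvDedup_core (l : List (List String)) :
    ∀ (acc : List (List String)) (seen : PySem.Set (List String)),
    (∀ x, x ∈ seen ↔ x ∈ acc) → l.Nodup → (∀ x ∈ l, x ∉ acc) →
    (l.foldl (fun (st : List (List String) × PySem.Set (List String)) cand =>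
        if cand ∈ st.2 then st else (st.1 ++ [cand], PySem.Set.add st.2 cand)) (acc, seen)).1
      = acc ++ l ∧
    (∀ x, x ∈ (l.foldl (fun (st : List (List String) × PySem.Set (List String)) cand =>
        if cand ∈ st.2 then st else (st.1 ++ [cand], PySem.Set.add st.2 cand)) (acc, seen)).2
        ↔ x ∈ acc ++ l) := by
  induction l with
  | nil => intro acc seen hs _ _; simp [hs]
  | cons c cs ih =>
    intro acc seen hs hnd hdis
    have hc : c ∉ seen := fun h => hdis c (by simp) ((hs c).mp h)
    rw [List.foldl_cons, if_neg hc]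
    have hs' : ∀ x, x ∈ PySem.Set.add seen c ↔ x ∈ acc ++ [c] := by
      intro x
      rw [PySem.Set.mem_add]
      simp [hs x]
    have hdis' : ∀ x ∈ cs, x ∉ acc ++ [c] := by
      intro x hx
      simp only [List.mem_append, List.mem_singleton]
      rintro (h | rfl)
      · exact hdis x (by simp [hx]) h
      · exact (List.nodup_cons.mp hnd).1 hx
    obtain ⟨h1, h2⟩ := ih (acc ++ [c]) (PySem.Set.add seen c) hs' (List.nodup_cons.mp hnd).2 hdis'
    constructor
    · rw [h1]; simp
    · intro x; rw [h2 x]; simp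

theorem pvDedup_nodup {l : List (List String)} (h : l.Nodup) : pvDedup l = l := by
  unfold pvDedup
  have := pvDedup_core l [] PySem.Set.empty (by simp [PySem.Set.empty]) h (by simp)
  rw [this.1]
  simp

theorem pvDedup_dup {l : List (List String)} {c : List String} (h : l.Nodup) (hc : c ∈ l) :
    pvDedup (l ++ [c]) = l := by
  unfold pvDedup
  rw [List.foldl_append]
  have core := pvDedup_core l [] PySem.Set.empty (by simp [PySem.Set.empty]) h (by simp)
  have hfst := core.1
  have hmem := (core.2 c).mpr (by simpa using hc)
  simp only [List.foldl_cons, List.foldl_nil]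
  rw [if_pos hmem, hfst]
  simp

-- a candidate with no matches never changes the running best
theorem pvConsider_nil (items : List PVItem) (b : List PVItem × List String)
    (c : List String) (h : pvMatched items c = []) : pvConsider items b c = b := by
  simp [pvConsider, h]

-- candidates rooted at a string that is not a root match nothing
theorem pvMatched_not_root (items : List PVItem) (pre : List String) (sh : String)
    (h : sh ∉ pvRootsA items) : pvMatched items (sh :: pre) = [] := by
  rw [pvMatched_cons]
  rw [List.filter_eq_nil_iff]
  intro it hit hrp
  apply h
  rw [pvRootsA_eq]
  rw [((pvRootsA_inv items [] (by simp)).2 sh)]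
  refine Or.inr ⟨it, hit, ?_⟩
  unfold pvRP at hrp
  cases hp : pvPath it with
  | nil => rw [hp] at hrp; simp at hrp
  | cons x t =>
    rw [hp] at hrp
    simp at hrp
    simp [hrp.1]

-- the first candidate (the bare prefix) produces B's initial best
theorem pvConsider_first (items : List PVItem) (pre : List String) :
    pvConsider items ([], []) pre
      = (if (pvMatched items pre).isEmpty then (([] : List PVItem), ([] : List String))
         else (pvMatched items pre, pre)) := by
  unfold pvConsider
  cases h : pvMatched items pre <;> simp_all

-- A's fold over the rooted candidates is B's fold over the roots
theorem pvSel (items : List PVItem) (pre : List String) (p0 : String)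
    (d : PySem.Dict String (List PVItem))
    (hM : ∀ r, d.getD r [] = pvMatched items (r :: pre)) :
    ∀ (roots : List String) (b : List PVItem × List String),
    ((roots.filter (fun r => decide (p0 ≠ r))).map (· :: pre)).foldl (pvConsider items) b
      = roots.foldl (fun b r =>
          if r ≠ p0 ∧ (d.getD r []).length > b.1.length then (d.getD r [], r :: pre) else b) b := by
  intro roots
  induction roots with
  | nil => intro b; rfl
  | cons r rs ih =>
    intro b
    by_cases hr : p0 = r
    · subst hr
      have hfil : List.filter (fun x => decide (p0 ≠ x)) (p0 :: rs)
          = List.filter (fun x => decide (p0 ≠ x)) rs := by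
        rw [List.filter_cons]; simp
      rw [hfil, List.foldl_cons, ih b]
      congr 1
      simp
    · have hr' : r ≠ p0 := fun h => hr h.symm
      have hfil : List.filter (fun x => decide (p0 ≠ x)) (r :: rs)
          = r :: List.filter (fun x => decide (p0 ≠ x)) rs := by
        rw [List.filter_cons]; simp [hr]
      rw [hfil, List.map_cons, List.foldl_cons, List.foldl_cons, ih]
      congr 1
      unfold pvConsider
      rw [hM r]
      simp [hr']


theorem pv_main (items : List PVItem) (path_expr sheet_hint : String) :
    filter_items_by_prefix items path_expr sheet_hint
      = filter_items_by_prefix_alt items path_expr sheet_hint := by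
  unfold filter_items_by_prefix filter_items_by_prefix_alt
  cases hpe : parse_path_expr path_expr with
  | nil => simp
  | cons p0 rest =>
    simp only []
    -- B's loop state
    have hc0 : ∀ r, (PySem.Dict.empty : PySem.Dict String (List PVItem)).contains r
        = decide (r ∈ (([], [], PySem.Dict.empty) :
            List PVItem × List String × PySem.Dict String (List PVItem)).2.1) := by
      intro r; simp [PySem.Dict.contains_empty]
    obtain ⟨hb, hr, _, hgd⟩ := pvB_inv (p0 :: rest) items ([], [], PySem.Dict.empty) hc0
    have hb' : (items.foldl (pvStepB (p0 :: rest)) ([], [], PySem.Dict.empty)).1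
        = pvMatched items (p0 :: rest) := by
      rw [hb, pvMatched_pre]; simp
    have hr' : (items.foldl (pvStepB (p0 :: rest)) ([], [], PySem.Dict.empty)).2.1
        = pvRootsA items := by rw [hr, pvRootsA_eq]
    have hgd' : ∀ r, (items.foldl (pvStepB (p0 :: rest)) ([], [], PySem.Dict.empty)).2.2.getD r []
        = pvMatched items (r :: p0 :: rest) := by
      intro r; rw [hgd r, pvMatched_cons]; simp [PySem.Dict.getD_empty]
    -- A's candidate list
    rw [pvCands p0 (p0 :: rest) (pvRootsA items)]
    -- facts about the deduplicated base list
    have hnroots : (pvRootsA items).Nodup := by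
      rw [pvRootsA_eq]; exact (pvRootsA_inv items [] (by simp)).1
    have hnrc : ((((pvRootsA items).filter (fun r => decide (p0 ≠ r))).map
        (· :: (p0 :: rest)))).Nodup := by
      refine List.Nodup.map ?_ (hnroots.filter _)
      intro a b h
      exact ((List.cons.injEq ..).mp h).1
    have hpre_notin : (p0 :: rest) ∉ (((pvRootsA items).filter (fun r => decide (p0 ≠ r))).map
        (· :: (p0 :: rest))) := by
      intro h
      obtain ⟨r, -, hr2⟩ := List.mem_map.mp h
      have := congrArg List.length hr2
      simp at this
    have hbase : ([p0 :: rest] ++ (((pvRootsA items).filter (fun r => decide (p0 ≠ r))).map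
        (· :: (p0 :: rest)))).Nodup := by
      rw [List.singleton_append]
      exact List.nodup_cons.mpr ⟨hpre_notin, hnrc⟩
    -- the selection folds agree on the base candidates
    have hfold : (([p0 :: rest] ++ (((pvRootsA items).filter (fun r => decide (p0 ≠ r))).map
          (· :: (p0 :: rest)))).foldl (pvConsider items) ([], []))
        = (items.foldl (pvStepB (p0 :: rest)) ([], [], PySem.Dict.empty)).2.1.foldl
            (fun b r => if r ≠ p0 ∧ ((items.foldl (pvStepB (p0 :: rest))
                ([], [], PySem.Dict.empty)).2.2.getD r []).length > b.1.length
              then ((items.foldl (pvStepB (p0 :: rest)) ([], [], PySem.Dict.empty)).2.2.getD r [],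
                r :: p0 :: rest) else b)
            (if (items.foldl (pvStepB (p0 :: rest)) ([], [], PySem.Dict.empty)).1.isEmpty
              then ([], []) else ((items.foldl (pvStepB (p0 :: rest))
                ([], [], PySem.Dict.empty)).1, p0 :: rest)) := by
      rw [List.singleton_append, List.foldl_cons, pvConsider_first]
      rw [pvSel items (p0 :: rest) p0 _ hgd' (pvRootsA items)]
      rw [hr', hb']
    by_cases hsh : sheet_hint ≠ "" ∧ p0 ≠ sheet_hint
    · rw [if_pos hsh]
      by_cases hin : sheet_hint ∈ pvRootsA items
      · have hmem : (sheet_hint :: p0 :: rest) ∈ ([p0 :: rest]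
            ++ (((pvRootsA items).filter (fun r => decide (p0 ≠ r))).map (· :: (p0 :: rest)))) := by
          simp only [List.mem_append, List.mem_map, List.mem_singleton]
          exact Or.inr ⟨sheet_hint, List.mem_filter.mpr ⟨hin, by simpa using hsh.2⟩, rfl⟩
        rw [pvDedup_dup hbase hmem, hfold]
      · have hnotin : (sheet_hint :: p0 :: rest) ∉ ([p0 :: rest]
            ++ (((pvRootsA items).filter (fun r => decide (p0 ≠ r))).map (· :: (p0 :: rest)))) := by
          simp only [List.mem_append, List.mem_map, List.mem_singleton]
          rintro (h | ⟨r, hr2, hr3⟩)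
          · have := congrArg List.length h; simp at this
          · have hreq : r = sheet_hint := ((List.cons.injEq ..).mp hr3).1
            subst hreq
            exact hin (List.mem_filter.mp hr2).1
        have hnd2 : (([p0 :: rest] ++ (((pvRootsA items).filter (fun r => decide (p0 ≠ r))).map
            (· :: (p0 :: rest)))) ++ [sheet_hint :: p0 :: rest]).Nodup := by
          refine hbase.append (List.nodup_singleton _) ?_
          intro a ha hmem
          rw [List.mem_singleton] at hmem
          subst hmem
          exact hnotin ha
        rw [pvDedup_nodup hnd2, List.foldl_append]
        simp only [List.foldl_cons, List.foldl_nil]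
        rw [pvConsider_nil _ _ _ (pvMatched_not_root items (p0 :: rest) sheet_hint hin), hfold]
    · rw [if_neg hsh, pvDedup_nodup hbase, hfold]

-- ===== VERDICT (by name: the statement is the Claim_ definition above) =====
theorem filter_items_by_prefix_spec : Claim_equal_filter_items_by_prefix := by
  intro items path_expr sheet_hint _
  unfold Spec_filter_items_by_prefix
  exact pv_main items path_expr sheet_hint
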